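-- pv_equiv track=rewrite | github.com/roo177/ykyth-backend | backend/helper/services/excel_import_service.py | check_tckn_passport_value
-- ===== SOURCE A (Python) =====
-- def check_tckn_passport_value(excel_list, row=1):
--     empty_list = []
--     not_empty_list = []
--     start_row = 1
--
--     for ex in excel_list:
--         if ex[0] is None and ex[1] is None:
--             empty_list.append(((int(start_row)), ex))
--
--         if ex[0] is not None and ex[1] is not None:
--             not_empty_list.append(((int(start_row)), ex))
--
--         start_row += 1
--
--     if len(empty_list) > 0:
--         return empty_list, True, False
--
--     if len(not_empty_list) > 0:
--         return not_empty_list, False, True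
--
--     return None, False, False
-- ===== SOURCE B (Python) =====
-- def check_tckn_passport_value(excel_list, row=1):
--     # B: two on-demand filtered scans with early return instead of one
--     # interleaved loop building both lists.
--     empty = [(i, ex) for i, ex in enumerate(excel_list, 1)
--              if ex[0] is None and ex[1] is None]
--     if empty:
--         return empty, True, False
--     filled = [(i, ex) for i, ex in enumerate(excel_list, 1)
--               if ex[0] is not None and ex[1] is not None]
--     if filled:
--         return filled, False, True
--     return None, False, False
-- ===== Notes on version B (the rewrite author's own statement) =====
-- stated objective: simpler
-- what changed: Replaces the single interleaved loop that maintains both lists and a manual row counter with two independent filtered comprehensions over enumerate(.,1) and an early return that skips building the filled list when any empty row exists.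
import Mathlib
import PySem

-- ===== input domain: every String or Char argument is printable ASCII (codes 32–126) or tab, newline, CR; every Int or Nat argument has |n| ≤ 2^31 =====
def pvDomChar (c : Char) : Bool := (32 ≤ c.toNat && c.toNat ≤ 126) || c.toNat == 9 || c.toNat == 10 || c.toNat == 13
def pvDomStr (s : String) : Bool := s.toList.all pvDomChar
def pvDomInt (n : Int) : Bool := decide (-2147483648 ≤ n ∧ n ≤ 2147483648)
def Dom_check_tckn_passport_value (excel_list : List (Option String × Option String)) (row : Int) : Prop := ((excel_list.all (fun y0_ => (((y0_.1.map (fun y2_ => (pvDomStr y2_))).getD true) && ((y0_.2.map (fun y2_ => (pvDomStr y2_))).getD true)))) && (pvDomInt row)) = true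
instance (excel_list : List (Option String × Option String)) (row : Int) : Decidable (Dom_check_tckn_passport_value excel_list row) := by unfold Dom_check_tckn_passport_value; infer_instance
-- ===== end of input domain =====

-- B replaces A's single interleaved loop with two filtered scans and an early return (same O(n) cost).
-- ===== PORT A =====
def pvStepA (st : List (Int × (Option String × Option String)) × List (Int × (Option String × Option String)) × Int)
    (ex : Option String × Option String) :
    List (Int × (Option String × Option String)) × List (Int × (Option String × Option String)) × Int :=
  let e := if ex.1.isNone && ex.2.isNone then st.1 ++ [(st.2.2, ex)] else st.1
  let n := if ex.1.isSome && ex.2.isSome then st.2.1 ++ [(st.2.2, ex)] else st.2.1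
  (e, n, st.2.2 + 1)

def check_tckn_passport_value (excel_list : List (Option String × Option String)) (row : Int) : (Option (List (Int × (Option String × Option String)))) × Bool × Bool :=
  let st := excel_list.foldl pvStepA ([], [], 1)
  if st.1.length > 0 then (some st.1, true, false)
  else if st.2.1.length > 0 then (some st.2.1, false, true)
  else (none, false, false)

-- ===== PORT B =====
def check_tckn_passport_value_alt (excel_list : List (Option String × Option String)) (row : Int) : (Option (List (Int × (Option String × Option String)))) × Bool × Bool :=
  let empty := (PySem.List.enumerate excel_list 1).filter
    (fun p => p.2.1.isNone && p.2.2.isNone)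
  if empty ≠ [] then (some empty, true, false)
  else
    let filled := (PySem.List.enumerate excel_list 1).filter
      (fun p => p.2.1.isSome && p.2.2.isSome)
    if filled ≠ [] then (some filled, false, true)
    else (none, false, false)

-- ===== PRECONDITION & SPEC =====
def Spec_check_tckn_passport_value (excel_list : List (Option String × Option String)) (row : Int) (out : (Option (List (Int × (Option String × Option String)))) × Bool × Bool) : Prop := out = check_tckn_passport_value_alt excel_list row
instance (excel_list : List (Option String × Option String)) (row : Int) (out : (Option (List (Int × (Option String × Option String)))) × Bool × Bool) : Decidable (Spec_check_tckn_passport_value excel_list row out) := by unfold Spec_check_tckn_passport_value; infer_instance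

-- ===== CLAIM =====
def Claim_equal_check_tckn_passport_value : Prop := ∀ (excel_list : List (Option String × Option String)) (row : Int), Dom_check_tckn_passport_value excel_list row → Spec_check_tckn_passport_value excel_list row (check_tckn_passport_value excel_list row)

-- ===== LEMMAS AND PROOFS =====
theorem pvFoldA_eq (xs : List (Option String × Option String))
    (e n : List (Int × (Option String × Option String))) (s : Int) :
    xs.foldl pvStepA (e, n, s) =
      (e ++ (PySem.List.enumerate xs s).filter (fun p => p.2.1.isNone && p.2.2.isNone),
       n ++ (PySem.List.enumerate xs s).filter (fun p => p.2.1.isSome && p.2.2.isSome),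
       s + xs.length) := by
  induction xs generalizing e n s with
  | nil => simp [PySem.List.enumerate_nil]
  | cons x xs ih =>
    simp only [List.foldl_cons, pvStepA, PySem.List.enumerate_cons, List.filter_cons, ih]
    cases hx1 : x.1 <;> cases hx2 : x.2 <;>
      simp [Option.isNone, Option.isSome, List.append_assoc] <;> ring_nf

-- ===== VERDICT =====
theorem check_tckn_passport_value_spec : Claim_equal_check_tckn_passport_value := by
  intro excel_list row _
  unfold Spec_check_tckn_passport_value check_tckn_passport_value check_tckn_passport_value_alt
  rw [pvFoldA_eq]
  simp only [List.nil_append]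
  set E := (PySem.List.enumerate excel_list 1).filter (fun p => p.2.1.isNone && p.2.2.isNone)
  set F := (PySem.List.enumerate excel_list 1).filter (fun p => p.2.1.isSome && p.2.2.isSome)
  rcases E with _ | ⟨a, E⟩ <;> rcases F with _ | ⟨b, F⟩ <;> simp
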